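-- pv_equiv track=rewrite | github.com/otsuneko/competitive-programming | field/contests/atcoder/rcl_contest_2021/a.py | sort_with_index
-- ===== SOURCE A (Python) =====
-- def sort_with_index(arr):
--
--     arr2 = sorted([ (x,i) for i, x in enumerate(arr)])
--     val = []
--     idx = []
--     for i in range(len(arr2)):
--         val.append(arr2[i][0])
--         idx.append(arr2[i][1])
--
--     return val,idx
-- ===== SOURCE B (Python) =====
-- def sort_with_index(arr):
--     def msort(p):
--         if len(p) < 2:
--             return p
--         m = len(p) // 2
--         L = msort(p[:m])
--         R = msort(p[m:])
--         out = []
--         i = j = 0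
--         while i < len(L) and j < len(R):
--             if R[j][0] < L[i][0]:
--                 out.append(R[j]); j += 1
--             else:
--                 out.append(L[i]); i += 1
--         out.extend(L[i:])
--         out.extend(R[j:])
--         return out
--
--     s = msort([(x, i) for i, x in enumerate(arr)])
--     return [p[0] for p in s], [p[1] for p in s]
-- ===== Notes on version B (the rewrite author's own statement) =====
-- stated objective: alternative
-- what changed: B replaces A's builtin sorted over tuples plus an index-loop split by a hand-written recursive top-down merge sort on (value, index) pairs (stable merge comparing values only, ties resolved by the left half's smaller indices), then two comprehensions to split values and indices.
import Mathlib
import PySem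

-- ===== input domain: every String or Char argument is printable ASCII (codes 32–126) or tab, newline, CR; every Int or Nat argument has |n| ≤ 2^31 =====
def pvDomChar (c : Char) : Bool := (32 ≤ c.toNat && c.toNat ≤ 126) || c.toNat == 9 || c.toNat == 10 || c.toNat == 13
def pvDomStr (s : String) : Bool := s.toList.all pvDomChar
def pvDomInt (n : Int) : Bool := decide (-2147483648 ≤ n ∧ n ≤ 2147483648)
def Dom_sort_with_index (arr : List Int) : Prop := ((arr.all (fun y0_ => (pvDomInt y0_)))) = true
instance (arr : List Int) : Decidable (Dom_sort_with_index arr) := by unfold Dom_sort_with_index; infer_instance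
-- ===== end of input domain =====

-- B replaces A's builtin sorted-on-tuples + index-loop split by a hand-written recursive
-- top-down merge sort on (value, index) pairs (stable merge comparing values only);
-- objective: alternative algorithm, same asymptotic cost.

-- ===== PORT A =====
def sort_with_index (arr : List Int) : List Int × List Int :=
  let arr2 := PySem.List.sorted2
      ((PySem.List.enumerate arr).map (fun p => (p.2, p.1)))
      (fun p => p.1) (fun p => p.2)
  let vi := (PySem.List.pyRange 0 (PySem.List.len arr2)).foldl
      (fun (s : List Int × List Int) i =>
        (s.1 ++ [(PySem.List.pyGetD arr2 i ((0 : Int), (0 : Int))).1],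
         s.2 ++ [(PySem.List.pyGetD arr2 i ((0 : Int), (0 : Int))).2]))
      ([], [])
  (vi.1, vi.2)

-- ===== PORT B =====
-- termination helper for the ports' slicing arithmetic
theorem pvHalf_nonneg (n : Nat) : (0 : Int) ≤ PySem.Int.floordiv (n : Int) 2 := by
  rw [show ((2 : Int)) = ((2 : Nat) : Int) from rfl, PySem.Int.floordiv_natCast]
  positivity

-- the 'while i < len(L) and j < len(R)' loop of Source B's merge, as the obvious structural
-- recursion over the same state (the unread suffixes L[i:], R[j:] and the accumulator out);
-- the fall-through case is Source B's 'out.extend(L[i:]); out.extend(R[j:])'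
def pvMergeLoop : List (Int × Int) → List (Int × Int) → List (Int × Int) → List (Int × Int)
  | [], R, out => out ++ R
  | p :: L, [], out => out ++ (p :: L)
  | p :: L, q :: R, out =>
      if q.1 < p.1 then pvMergeLoop (p :: L) R (out ++ [q])
      else pvMergeLoop L (q :: R) (out ++ [p])
termination_by L R _ => L.length + R.length

-- Source B's recursive msort; p[:m] / p[m:] are Python slices with m = len(p)//2
def pvMsort (p : List (Int × Int)) : List (Int × Int) :=
  if _h : PySem.List.len p < 2 then p
  else
    let m := PySem.Int.floordiv (PySem.List.len p) 2
    let L := pvMsort (PySem.List.slice p none (some m))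
    let R := pvMsort (PySem.List.slice p (some m))
    pvMergeLoop L R []
termination_by p.length
decreasing_by
  · simp only [PySem.List.len] at _h ⊢
    rw [PySem.List.slice_to p (pvHalf_nonneg p.length)]
    simp [List.length_take]; omega
  · simp only [PySem.List.len] at _h ⊢
    rw [PySem.List.slice_from p (pvHalf_nonneg p.length)]
    simp [List.length_drop]; omega

def sort_with_index_alt (arr : List Int) : List Int × List Int :=
  let s := pvMsort ((PySem.List.enumerate arr).map (fun p => (p.2, p.1)))
  (s.map (fun p => p.1), s.map (fun p => p.2))

-- ===== PRECONDITION & SPEC =====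
def Spec_sort_with_index (arr : List Int) (out : List Int × List Int) : Prop := out = sort_with_index_alt arr
instance (arr : List Int) (out : List Int × List Int) : Decidable (Spec_sort_with_index arr out) := by unfold Spec_sort_with_index; infer_instance

-- ===== CLAIM (what is proved, stated in full; the proofs are below) =====
def Claim_equal_sort_with_index : Prop := ∀ (arr : List Int), Dom_sort_with_index arr → Spec_sort_with_index arr (sort_with_index arr)

-- ===== LEMMAS AND PROOFS =====

theorem pvHalf_len (n : Nat) : (PySem.Int.floordiv (n : Int) 2).toNat = n / 2 := by
  rw [show ((2 : Int)) = ((2 : Nat) : Int) from rfl, PySem.Int.floordiv_natCast]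
  exact Int.toNat_natCast _

-- lex-≤ on (value, index) pairs: the order both programs sort by
def pvLexLe (p q : Int × Int) : Prop := toLex p ≤ toLex q

-- accumulator-free structural merge, for the proofs
def pvMergeS : List (Int × Int) → List (Int × Int) → List (Int × Int)
  | [], R => R
  | p :: L, [] => p :: L
  | p :: L, q :: R =>
      if q.1 < p.1 then q :: pvMergeS (p :: L) R
      else p :: pvMergeS L (q :: R)
termination_by L R => L.length + R.length

theorem pvMergeLoop_eq (L R out : List (Int × Int)) :
    pvMergeLoop L R out = out ++ pvMergeS L R := by
  fun_induction pvMergeS L R generalizing out with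
  | case1 R => rw [pvMergeLoop.eq_1]
  | case2 p L => rw [pvMergeLoop.eq_2]
  | case3 p L q R h ih =>
      rw [pvMergeLoop.eq_3, if_pos h, ih]; simp
  | case4 p L q R h ih =>
      rw [pvMergeLoop.eq_3, if_neg h, ih]; simp

theorem pvMergeS_perm (L R : List (Int × Int)) : (pvMergeS L R).Perm (L ++ R) := by
  fun_induction pvMergeS L R with
  | case1 R => simp
  | case2 p L => simp
  | case3 p L q R h ih =>
      exact (ih.cons q).trans
        (by simpa using (List.perm_middle (a := q) (l₁ := p :: L) (l₂ := R)).symm)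
  | case4 p L q R h ih => simpa using ih.cons p

theorem pvMergeS_pairwise (L R : List (Int × Int))
    (hL : L.Pairwise pvLexLe) (hR : R.Pairwise pvLexLe)
    (hx : ∀ p ∈ L, ∀ q ∈ R, p.2 < q.2) :
    (pvMergeS L R).Pairwise pvLexLe := by
  revert hL hR hx
  fun_induction pvMergeS L R with
  | case1 R => intro _ hR _; exact hR
  | case2 p L => intro hL _ _; exact hL
  | case3 p L q R h ih =>
      intro hL hR hx
      refine List.Pairwise.cons ?_ (ih hL hR.of_cons (fun a ha b hb => hx a ha b (by simp [hb])))
      intro y hy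
      have hy' : y ∈ (p :: L) ++ R := (pvMergeS_perm _ _).mem_iff.mp hy
      rcases List.mem_append.mp hy' with hyL | hyR
      · -- q.1 < p.1 ≤ y.1
        rcases List.mem_cons.mp hyL with rfl | hyL'
        · exact le_of_lt (Prod.Lex.toLex_lt_toLex.mpr (Or.inl h))
        · have : pvLexLe p y := List.rel_of_pairwise_cons hL hyL'
          have hpy : p.1 < y.1 ∨ p.1 = y.1 ∧ p.2 ≤ y.2 := Prod.Lex.toLex_le_toLex.mp this
          refine le_of_lt (Prod.Lex.toLex_lt_toLex.mpr (Or.inl ?_))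
          rcases hpy with h1 | ⟨h1, _⟩ <;> omega
      · exact List.rel_of_pairwise_cons hR hyR
  | case4 p L q R h ih =>
      intro hL hR hx
      have hpq2 : p.2 < q.2 := hx p (by simp) q (by simp)
      refine List.Pairwise.cons ?_ (ih hL.of_cons hR (fun a ha b hb => hx a (by simp [ha]) b hb))
      intro y hy
      have hy' : y ∈ L ++ (q :: R) := (pvMergeS_perm _ _).mem_iff.mp hy
      rcases List.mem_append.mp hy' with hyL | hyR
      · exact List.rel_of_pairwise_cons hL hyL
      · rcases List.mem_cons.mp hyR with rfl | hyR'
        · refine Prod.Lex.toLex_le_toLex.mpr ?_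
          rcases lt_or_eq_of_le (by omega : p.1 ≤ y.1) with h1 | h1
          · exact Or.inl h1
          · exact Or.inr ⟨h1, le_of_lt hpq2⟩
        · have hqy : pvLexLe q y := List.rel_of_pairwise_cons hR hyR'
          have hqy' : q.1 < y.1 ∨ q.1 = y.1 ∧ q.2 ≤ y.2 := Prod.Lex.toLex_le_toLex.mp hqy
          refine Prod.Lex.toLex_le_toLex.mpr ?_
          have hp1q1 : p.1 ≤ q.1 := by omega
          rcases lt_or_eq_of_le (le_trans hp1q1 (by rcases hqy' with h1 | ⟨h1, _⟩ <;> omega : q.1 ≤ y.1)) with h1 | h1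
          · exact Or.inl h1
          · refine Or.inr ⟨h1, ?_⟩
            have : q.1 = p.1 := by rcases hqy' with h2 | ⟨h2, _⟩ <;> omega
            rcases hqy' with h2 | ⟨_, h2⟩
            · omega
            · omega

theorem pvMsort_spec (n : Nat) : ∀ p : List (Int × Int), p.length ≤ n →
    p.Pairwise (fun a b => a.2 < b.2) →
    (pvMsort p).Perm p ∧ (pvMsort p).Pairwise pvLexLe := by
  induction n with
  | zero =>
      intro p hlen hp
      have hnil : p = [] := List.eq_nil_of_length_eq_zero (by omega)
      subst hnil
      rw [pvMsort.eq_def]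
      simp [PySem.List.len]
  | succ n ih =>
      intro p hlen hp
      rw [pvMsort.eq_def]
      by_cases h : PySem.List.len p < 2
      · rw [dif_pos h]
        refine ⟨List.Perm.refl _, ?_⟩
        simp only [PySem.List.len] at h
        match p with
        | [] => simp
        | [a] => simp
        | a :: b :: t => exfalso; simp at h; omega
      · rw [dif_neg h]
        simp only [PySem.List.len] at h ⊢
        rw [PySem.List.slice_to p (pvHalf_nonneg p.length),
            PySem.List.slice_from p (pvHalf_nonneg p.length), pvHalf_len]
        have hlen2 : 2 ≤ p.length := by omega
        have hp' : (p.take (p.length / 2) ++ p.drop (p.length / 2)).Pairwise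
            (fun a b => a.2 < b.2) := by rwa [List.take_append_drop]
        obtain ⟨hpt, hpd, hcross⟩ := List.pairwise_append.mp hp'
        obtain ⟨hLperm, hLsort⟩ := ih (p.take (p.length / 2))
          (by simp [List.length_take]; omega) hpt
        obtain ⟨hRperm, hRsort⟩ := ih (p.drop (p.length / 2))
          (by simp [List.length_drop]; omega) hpd
        constructor
        · rw [pvMergeLoop_eq]
          refine List.Perm.trans ?_ (by rw [List.take_append_drop] :
            (p.take (p.length / 2) ++ p.drop (p.length / 2)).Perm p)
          simpa using (pvMergeS_perm _ _).trans (hLperm.append hRperm)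
        · rw [pvMergeLoop_eq]
          simp only [List.nil_append]
          exact pvMergeS_pairwise _ _ hLsort hRsort
            (fun a ha b hb => hcross a (hLperm.mem_iff.mp ha) b (hRperm.mem_iff.mp hb))

-- the (value, index) input list both programs sort, and its index monotonicity
theorem pvPairs_pairwise (arr : List Int) :
    ((PySem.List.enumerate arr).map (fun p => (p.2, p.1))).Pairwise
      (fun a b => a.2 < b.2) := by
  rw [PySem.List.enumerate_eq_map_pyRange arr 0]
  rw [List.map_map]
  refine List.Pairwise.map _ ?_ (PySem.List.pairwise_lt_pyRange_one 0 (PySem.List.len arr))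
  intro a b hab
  simpa using hab

-- the tuple-key "before" test sorted2 uses, named for the proofs
def pvBefore2 (p q : Int × Int) : Bool :=
  decide (p.1 < q.1) || (!decide (q.1 < p.1) && decide (p.2 < q.2))

-- A's sorted2 with keys fst, snd IS insertion sort by the lex key
theorem pvSorted2_eq_sorted_lex (l : List (Int × Int)) :
    PySem.List.sorted2 l (fun p => p.1) (fun p => p.2)
      = PySem.List.sorted l (fun p => toLex p) := by
  rw [PySem.List.sorted_eq_foldl_insertBy]
  show l.foldl (fun acc x => PySem.List.insertBy pvBefore2 x acc) [] = _
  have hb : pvBefore2 = fun a b : Int × Int => decide (toLex a < toLex b) := by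
    funext a b
    rcases lt_trichotomy a.1 b.1 with h | h | h
    · simp [pvBefore2, Prod.Lex.toLex_lt_toLex, h, lt_asymm h]
    · simp [pvBefore2, Prod.Lex.toLex_lt_toLex, h]
    · simp [pvBefore2, Prod.Lex.toLex_lt_toLex, h, lt_asymm h]; omega
  exact PySem.List.foldl_congr_mem l
    (fun acc x => PySem.List.insertBy pvBefore2 x acc)
    (fun acc x => PySem.List.insertBy (fun a b => decide (toLex a < toLex b)) x acc) []
    (fun acc x _ => by rw [hb])

-- A's sorted pair list equals B's merge-sorted pair list (unique sorted order under the injective lex key)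
theorem pvSorted_eq_msort (arr : List Int) :
    PySem.List.sorted2 ((PySem.List.enumerate arr).map (fun p => (p.2, p.1)))
        (fun p => p.1) (fun p => p.2)
      = pvMsort ((PySem.List.enumerate arr).map (fun p => (p.2, p.1))) := by
  set l := (PySem.List.enumerate arr).map (fun p => (p.2, p.1)) with hl
  obtain ⟨hperm, hsort⟩ := pvMsort_spec l.length l le_rfl (pvPairs_pairwise arr)
  rw [pvSorted2_eq_sorted_lex]
  refine PySem.List.eq_of_perm_of_pairwise_le_of_injective (fun p : Int × Int => toLex p)
      toLex.injective ((PySem.List.sorted_perm l _ false).trans hperm.symm) ?_ hsort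
  exact PySem.List.sorted_pairwise l _

-- A's split loop over range(len(arr2)) produces (map fst, map snd)
theorem pvSplit_loop (l : List (Int × Int)) :
    (PySem.List.pyRange 0 (PySem.List.len l)).foldl
      (fun (s : List Int × List Int) i =>
        (s.1 ++ [(PySem.List.pyGetD l i ((0 : Int), (0 : Int))).1],
         s.2 ++ [(PySem.List.pyGetD l i ((0 : Int), (0 : Int))).2]))
      ([], [])
      = (l.map (fun p => p.1), l.map (fun p => p.2)) := by
  rw [PySem.List.foldl_pyRange_zero_pyGetD l ((0 : Int), (0 : Int))
      (fun (s : List Int × List Int) p => (s.1 ++ [p.1], s.2 ++ [p.2])) ([], [])]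
  rw [PySem.List.foldl_prod_mk (f := fun acc (p : Int × Int) => acc ++ [p.1])
      (g := fun acc (p : Int × Int) => acc ++ [p.2])]
  rw [PySem.List.foldl_append_singleton_eq_map (f := fun p : Int × Int => p.1),
      PySem.List.foldl_append_singleton_eq_map (f := fun p : Int × Int => p.2)]
  simp

-- ===== VERDICT (by name: the statement is the Claim_ definition above) =====
theorem sort_with_index_spec : Claim_equal_sort_with_index := by
  intro arr _hd
  show sort_with_index arr = sort_with_index_alt arr
  simp only [sort_with_index, sort_with_index_alt]
  rw [pvSplit_loop, pvSorted_eq_msort]
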